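-- pv_equiv track=rewrite | github.com/gmcvicker/impute | python/import_genos.py | make_snp_lookup
-- ===== SOURCE A (Python) =====
-- def make_snp_lookup(snp_tab):
--     snp_lookup = {}
--     bad_snps = set([])
--
--     row_num = 0
--     for row in snp_tab:
--         key =  row['pos']
--         if key in snp_lookup:
--             # Multiple SNPs at same location
--             bad_snps.add(key)
--         snp_lookup[key] = row_num
--         row_num += 1
--
--     return snp_lookup, bad_snps
-- ===== SOURCE B (Python) =====
-- def make_snp_lookup(snp_tab):
--     rows = list(snp_tab)
--     # last index wins, insertion order of first occurrence kept (dict semantics)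
--     snp_lookup = {row['pos']: i for i, row in enumerate(rows)}
--     # built from the reversed row sequence, so the final value per position is
--     # the index of its FIRST occurrence
--     first_idx = {row['pos']: i for i, row in reversed(list(enumerate(rows)))}
--     # a row is a repeat exactly when it is not the first occurrence of its position
--     bad_snps = {row['pos'] for i, row in enumerate(rows) if first_idx[row['pos']] != i}
--     return snp_lookup, bad_snps
-- ===== Notes on version B (the rewrite author's own statement) =====
-- stated objective: alternative
-- what changed: A's single fused loop that tests membership in the growing dict is replaced by three independent comprehension-style passes: a last-index dict comprehension, a first-occurrence-index dict built from the reversed row sequence, and a set comprehension collecting rows that are not the first occurrence of their position.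
import Mathlib
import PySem

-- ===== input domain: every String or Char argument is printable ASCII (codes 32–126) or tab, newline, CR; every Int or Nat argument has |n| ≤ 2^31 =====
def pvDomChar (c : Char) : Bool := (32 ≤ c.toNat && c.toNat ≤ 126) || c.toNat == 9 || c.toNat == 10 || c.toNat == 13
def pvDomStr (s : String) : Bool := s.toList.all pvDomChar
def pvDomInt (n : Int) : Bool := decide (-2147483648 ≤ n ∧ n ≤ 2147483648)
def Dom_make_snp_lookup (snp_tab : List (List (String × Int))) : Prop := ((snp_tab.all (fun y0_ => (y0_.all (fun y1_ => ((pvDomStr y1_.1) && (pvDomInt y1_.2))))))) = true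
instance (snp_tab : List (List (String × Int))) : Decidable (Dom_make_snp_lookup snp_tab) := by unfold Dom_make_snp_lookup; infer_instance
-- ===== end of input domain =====

-- B replaces A's fused membership-tracking loop by three comprehension-style passes:
-- a last-index dict, a first-index dict built from the reversed rows, and a repeat-row
-- set comprehension; same cost, different decomposition (objective: alternative).

-- ===== PORT A =====
-- row['pos'] (total form; Pre_ guarantees the key is present)
def pvRowPos (row : List (String × Int)) : Int := (PySem.Dict.mk row).getD "pos" 0

def pvStepA (st : PySem.Dict Int Int × PySem.Set Int × Int) (row : List (String × Int)) :
    PySem.Dict Int Int × PySem.Set Int × Int :=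
  let key := pvRowPos row
  (st.1.insert key st.2.2,
   if st.1.contains key then PySem.Set.add st.2.1 key else st.2.1,
   st.2.2 + 1)

def make_snp_lookup (snp_tab : List (List (String × Int))) : (List (Int × Int)) × List Int :=
  let st := snp_tab.foldl pvStepA (PySem.Dict.empty, PySem.Set.empty, 0)
  (st.1.items, st.2.1)

-- ===== PORT B =====
-- {row['pos']: i for (i,row) in l}
def pvInsStep (d : PySem.Dict Int Int) (p : Int × List (String × Int)) : PySem.Dict Int Int :=
  d.insert (pvRowPos p.2) p.1

-- first_idx = {row['pos']: i for i, row in reversed(list(enumerate(rows)))}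
def pvFirst (rows : List (List (String × Int))) : PySem.Dict Int Int :=
  (PySem.List.enumerate rows 0).reverse.foldl pvInsStep PySem.Dict.empty

-- one step of the set comprehension 'if first_idx[row['pos']] != i'
def pvBadStep (first : PySem.Dict Int Int) (s : PySem.Set Int) (p : Int × List (String × Int)) :
    PySem.Set Int :=
  if first.getD (pvRowPos p.2) 0 ≠ p.1 then PySem.Set.add s (pvRowPos p.2) else s

def make_snp_lookup_alt (snp_tab : List (List (String × Int))) : (List (Int × Int)) × List Int :=
  let rows := PySem.List.enumerate snp_tab 0
  let snp_lookup := rows.foldl pvInsStep PySem.Dict.empty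
  let first_idx := pvFirst snp_tab
  let bad_snps := rows.foldl (pvBadStep first_idx) PySem.Set.empty
  (snp_lookup.items, bad_snps)

-- ===== PRECONDITION & SPEC =====
-- Pre_ excludes exactly the rows without a 'pos' key, where Python A raises KeyError.
def Pre_make_snp_lookup (snp_tab : List (List (String × Int))) : Prop :=
  (snp_tab.all (fun row => row.any (fun p => p.1 == "pos"))) = true
instance (snp_tab : List (List (String × Int))) : Decidable (Pre_make_snp_lookup snp_tab) := by unfold Pre_make_snp_lookup; infer_instance

def pvWitness_make_snp_lookup : (List (List (String × Int))) :=
  [[("pos", 5)], [("pos", 3)], [("pos", 5)]]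

def Spec_make_snp_lookup (snp_tab : List (List (String × Int))) (out : (List (Int × Int)) × List Int) : Prop := out = make_snp_lookup_alt snp_tab
instance (snp_tab : List (List (String × Int))) (out : (List (Int × Int)) × List Int) : Decidable (Spec_make_snp_lookup snp_tab out) := by unfold Spec_make_snp_lookup; infer_instance

-- ===== CLAIM (what is proved, stated in full; the proofs are below) =====
def Claim_equal_make_snp_lookup : Prop := ∀ (snp_tab : List (List (String × Int))), Dom_make_snp_lookup snp_tab → Pre_make_snp_lookup snp_tab → Spec_make_snp_lookup snp_tab (make_snp_lookup snp_tab)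

-- ===== LEMMAS AND PROOFS =====

-- the dict component of A's loop is exactly B's lookup fold
theorem foldA_dict (l : List (List (String × Int))) :
    ∀ (d : PySem.Dict Int Int) (s : PySem.Set Int) (n : Int),
    (l.foldl pvStepA (d, s, n)).1 =
      (PySem.List.enumerate l n).foldl pvInsStep d := by
  induction l with
  | nil => intro d s n; simp [PySem.List.enumerate_nil]
  | cons x xs ih =>
    intro d s n
    simp only [List.foldl_cons, PySem.List.enumerate_cons, pvStepA, pvInsStep]
    exact ih _ _ _

-- a left fold of inserts answers get? by the LAST matching insert
theorem get?_foldl_ins (l : List (Int × List (String × Int))) :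
    ∀ (d : PySem.Dict Int Int) (k : Int),
    ((l.foldl pvInsStep d).get? k) =
      (match l.reverse.find? (fun p => pvRowPos p.2 == k) with
       | some p => some p.1
       | none => d.get? k) := by
  induction l with
  | nil => intro d k; simp
  | cons x xs ih =>
    intro d k
    simp only [List.foldl_cons, List.reverse_cons, List.find?_append]
    rw [ih]
    cases hfind : xs.reverse.find? (fun p => pvRowPos p.2 == k) with
    | some p => simp
    | none =>
      simp only [Option.or, List.find?_singleton, pvInsStep]
      by_cases hk : pvRowPos x.2 = k
      · subst hk; simp [PySem.Dict.get?_insert_self]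
      · simp [hk, Ne.symm hk, PySem.Dict.get?_insert]

theorem get?_pvFirst (rows : List (List (String × Int))) (k : Int) :
    (pvFirst rows).get? k =
      (match (PySem.List.enumerate rows 0).find? (fun p => pvRowPos p.2 == k) with
       | some p => some p.1
       | none => none) := by
  rw [pvFirst, get?_foldl_ins, List.reverse_reverse]
  cases (PySem.List.enumerate rows 0).find? (fun p => pvRowPos p.2 == k) <;> simp

-- core condition equivalence: 'key already in the running dict' = 'this row is not the
-- first occurrence of its position' (first_idx taken over the WHOLE table)
theorem cond_eq (pre : List (List (String × Int))) (x : List (String × Int))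
    (xs : List (List (String × Int))) :
    (pvRowPos x ∈ pre.map pvRowPos) ↔
      (pvFirst (pre ++ x :: xs)).getD (pvRowPos x) 0 ≠ (pre.length : Int) := by
  have hget := get?_pvFirst (pre ++ x :: xs) (pvRowPos x)
  rw [PySem.List.enumerate_append, List.find?_append] at hget
  by_cases h : pvRowPos x ∈ pre.map pvRowPos
  · obtain ⟨row, hrow, hkey⟩ := List.mem_map.mp h
    obtain ⟨j, hj, hje⟩ := List.mem_iff_getElem.mp hrow
    have hmem : ((0 + (j : Int), row) : Int × List (String × Int)) ∈ PySem.List.enumerate pre 0 := by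
      rw [PySem.List.mem_enumerate_iff]; exact ⟨j, hj, by rw [hje]⟩
    have hsome : ((PySem.List.enumerate pre 0).find? (fun p => pvRowPos p.2 == pvRowPos x)).isSome := by
      rw [List.find?_isSome]
      exact ⟨_, hmem, by simpa using hkey⟩
    obtain ⟨q, hq⟩ := Option.isSome_iff_exists.mp hsome
    have hqmem := List.mem_of_find?_eq_some hq
    obtain ⟨j', hj', hje'⟩ := (PySem.List.mem_enumerate_iff _ _ _).mp hqmem
    rw [hq] at hget
    simp only [Option.or] at hget
    have hgd : (pvFirst (pre ++ x :: xs)).getD (pvRowPos x) 0 = q.1 := by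
      rw [PySem.Dict.getD_eq_get?_getD, hget]; rfl
    constructor
    · intro _
      rw [hgd, hje']
      have : (j' : Int) < (pre.length : Int) := by exact_mod_cast hj'
      omega
    · intro _; exact h
  · have hnone : (PySem.List.enumerate pre 0).find? (fun p => pvRowPos p.2 == pvRowPos x) = none := by
      rw [List.find?_eq_none]
      intro p hp
      obtain ⟨j, hj, hje⟩ := (PySem.List.mem_enumerate_iff _ _ _).mp hp
      simp only [hje, beq_iff_eq]
      intro hc
      exact h (List.mem_map.mpr ⟨pre[j], List.getElem_mem hj, hc⟩)
    rw [hnone] at hget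
    simp only [PySem.List.enumerate_cons, List.find?_cons, beq_self_eq_true,
      Option.or] at hget
    have hgd : (pvFirst (pre ++ x :: xs)).getD (pvRowPos x) 0 = 0 + (pre.length : Int) := by
      rw [PySem.Dict.getD_eq_get?_getD, hget]; rfl
    constructor
    · intro hc; exact absurd hc h
    · intro hne; exact absurd (by rw [hgd]; omega) hne

-- main invariant: the set component of A's loop over the remaining rows equals B's
-- set-comprehension fold, given that the running dict contains exactly the prefix keys
theorem main_set (l : List (List (String × Int))) :
    ∀ (pre : List (List (String × Int))) (d : PySem.Dict Int Int) (s : PySem.Set Int),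
    (∀ k, d.contains k = decide (k ∈ pre.map pvRowPos)) →
    (l.foldl pvStepA (d, s, (pre.length : Int))).2.1 =
      (PySem.List.enumerate l (pre.length : Int)).foldl (pvBadStep (pvFirst (pre ++ l))) s := by
  induction l with
  | nil => intro pre d s _; simp [PySem.List.enumerate_nil]
  | cons x xs ih =>
    intro pre d s hd
    simp only [List.foldl_cons, PySem.List.enumerate_cons]
    have hcond : d.contains (pvRowPos x) =
        decide ((pvFirst (pre ++ x :: xs)).getD (pvRowPos x) 0 ≠ (pre.length : Int)) := by
      rw [hd]; exact decide_eq_decide.mpr (cond_eq pre x xs)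
    have hd' : ∀ k, (d.insert (pvRowPos x) (pre.length : Int)).contains k =
        decide (k ∈ (pre ++ [x]).map pvRowPos) := by
      intro k
      rw [PySem.Dict.contains_insert, hd]
      simp only [List.map_append, List.map_cons, List.map_nil, List.mem_append,
        List.mem_singleton]
      by_cases hk : k = pvRowPos x
      · simp [hk]
      · simp [hk, Or.comm]
    have hlen : ((pre ++ [x]).length : Int) = (pre.length : Int) + 1 := by
      simp
    have := ih (pre ++ [x]) (d.insert (pvRowPos x) (pre.length : Int))
      (if d.contains (pvRowPos x) then PySem.Set.add s (pvRowPos x) else s) hd'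
    rw [hlen, List.append_assoc] at this
    simp only [List.cons_append, List.nil_append] at this
    rw [pvStepA]
    simp only []
    rw [this]
    congr 1
    rw [pvBadStep]
    by_cases hc : (pvFirst (pre ++ x :: xs)).getD (pvRowPos x) 0 ≠ (pre.length : Int)
    · simp [hc, hcond]
    · simp only [not_not] at hc; simp [hc, hcond]

-- ===== VERDICT (by name: the statement is the Claim_ definition above) =====
theorem make_snp_lookup_spec : Claim_equal_make_snp_lookup := by
  intro snp_tab _ _
  show _ = make_snp_lookup_alt snp_tab
  rw [make_snp_lookup, make_snp_lookup_alt]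
  have hdict := foldA_dict snp_tab PySem.Dict.empty PySem.Set.empty 0
  have hset := main_set snp_tab [] PySem.Dict.empty PySem.Set.empty
    (by intro k; simp [PySem.Dict.contains_empty])
  simp only [List.length_nil, Nat.cast_zero, List.nil_append] at hset
  simp only [hdict, hset]
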